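-- pv_equiv track=rewrite | github.com/Zhang-SDU/cst-project | SM2/Google_Passwd_Checkup/client.py | str_2_int
-- ===== SOURCE A (Python) =====
-- def str_2_int(hash):
--     int_value = 0
--     base = 1
--     for i in hash:
--         temp = ord(i) * base
--         base = base + 1
--         int_value += temp
--     return int_value
-- ===== SOURCE B (Python) =====
-- def str_2_int(hash):
--     # Staged decomposition with no multiplication and no explicit index:
--     # pass 1 builds the list of suffix code-sums (reverse scan with a
--     # running accumulator); pass 2 sums that list. Summing all suffix
--     # sums weights each character by its 1-based position.
--     running = 0
--     suffixes = []
--     for c in reversed(hash):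
--         running += ord(c)
--         suffixes.append(running)
--     return sum(suffixes)
-- ===== Notes on version B (the rewrite author's own statement) =====
-- stated objective: alternative
-- what changed: Replaces the single indexed pass with per-character multiplication by a two-stage scheme: a reverse scan builds the list of suffix code-sums, and a second pass sums that list, which equals the 1-based position-weighted sum.
import Mathlib
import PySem

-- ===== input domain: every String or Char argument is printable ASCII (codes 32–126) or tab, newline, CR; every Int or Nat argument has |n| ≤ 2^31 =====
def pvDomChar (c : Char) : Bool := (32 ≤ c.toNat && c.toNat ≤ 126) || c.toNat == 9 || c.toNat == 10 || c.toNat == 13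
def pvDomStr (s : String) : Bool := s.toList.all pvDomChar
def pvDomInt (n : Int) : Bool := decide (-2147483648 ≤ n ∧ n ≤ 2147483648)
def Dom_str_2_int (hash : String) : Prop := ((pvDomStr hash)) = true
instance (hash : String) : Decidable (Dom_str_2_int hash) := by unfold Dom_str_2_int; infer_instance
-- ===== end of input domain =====

-- B replaces the indexed multiply-and-accumulate pass by two stages (build the list of suffix code-sums, then sum it); same O(n) cost.

-- ===== PORT A =====
-- A: int_value = 0; base = 1; for i in hash: int_value += ord(i)*base; base += 1
def str_2_int (hash : String) : Int :=
  (hash.toList.foldl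
    (fun (st : Int × Int) (i : Char) =>
      (st.1 + (i.toNat : Int) * st.2, st.2 + 1))
    (0, 1)).1

-- ===== PORT B =====
-- B stage 1: running = 0; suffixes = []; for c in reversed(hash): running += ord(c); suffixes.append(running)
-- B stage 2: return sum(suffixes)
def str_2_int_alt (hash : String) : Int :=
  let suffixes : List Int :=
    (hash.toList.reverse.foldl
      (fun (st : Int × List Int) (c : Char) =>
        ((c.toNat : Int) + st.1, st.2 ++ [(c.toNat : Int) + st.1]))
      (0, [])).2
  suffixes.foldl (· + ·) 0

-- ===== PRECONDITION & SPEC =====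
def Spec_str_2_int (hash : String) (out : Int) : Prop := out = str_2_int_alt hash
instance (hash : String) (out : Int) : Decidable (Spec_str_2_int hash out) := by unfold Spec_str_2_int; infer_instance

-- ===== CLAIM (what is proved, stated in full; the proofs are below) =====
def Claim_equal_str_2_int : Prop := ∀ (hash : String), Dom_str_2_int hash → Spec_str_2_int hash (str_2_int hash)

-- ===== LEMMAS AND PROOFS =====

-- reference: 1-based weighted sum starting at base b, and plain code sum
def pvWsum (b : Int) : List Char → Int
  | [] => 0
  | c :: t => (c.toNat : Int) * b + pvWsum (b + 1) t

def pvCsum : List Char → Int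
  | [] => 0
  | c :: t => (c.toNat : Int) + pvCsum t

theorem pvWsum_shift (t : List Char) (b : Int) :
    pvWsum (b + 1) t = pvCsum t + pvWsum b t := by
  induction t generalizing b with
  | nil => simp [pvWsum, pvCsum]
  | cons c t ih => simp [pvWsum, pvCsum, ih (b + 1)]; ring

theorem pvA_fold (l : List Char) (v b : Int) :
    (l.foldl (fun (st : Int × Int) (i : Char) =>
      (st.1 + (i.toNat : Int) * st.2, st.2 + 1)) (v, b)).1 = v + pvWsum b l := by
  induction l generalizing v b with
  | nil => simp [pvWsum]
  | cons c t ih => simp [List.foldl, pvWsum, ih]; ring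

-- stage-1 invariant: the reverse fold returns the code sum and the suffix-sum list
def pvSufs : List Char → List Int
  | [] => []
  | c :: t => pvSufs t ++ [(c.toNat : Int) + pvCsum t]

theorem pvB_stage1 (l : List Char) :
    l.reverse.foldl (fun (st : Int × List Int) (c : Char) =>
      ((c.toNat : Int) + st.1, st.2 ++ [(c.toNat : Int) + st.1])) (0, [])
    = (pvCsum l, pvSufs l) := by
  induction l with
  | nil => simp [pvCsum, pvSufs]
  | cons c t ih => simp [List.foldl_append, ih, pvCsum, pvSufs]

theorem pvFoldl_add (l : List Int) (a : Int) :
    l.foldl (· + ·) a = a + l.sum := by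
  induction l generalizing a with
  | nil => simp
  | cons x t ih => simp [List.foldl, ih]; ring

theorem pvB_stage2 (l : List Char) : (pvSufs l).sum = pvWsum 1 l := by
  induction l with
  | nil => simp [pvSufs, pvWsum]
  | cons c t ih =>
    have hs := pvWsum_shift t 1
    simp [pvSufs, pvWsum, ih]
    simp at hs
    rw [hs]; ring

-- ===== VERDICT (by name: the statement is the Claim_ definition above) =====
theorem str_2_int_spec : Claim_equal_str_2_int := by
  intro hash _
  unfold Spec_str_2_int str_2_int str_2_int_alt
  rw [pvA_fold, pvB_stage1, pvFoldl_add, pvB_stage2]
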